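-- pv_equiv track=rewrite | github.com/WaterSpooner/Advent-of-Code | day12/d12p1.py | tryCombinations
-- ===== SOURCE A (Python) =====
-- def contiguous(springRange):
--     return [(spring[1] - spring[0]) for spring in springRange]
--
-- def addSpring(springRange,index):
--     join = []
--     for spring in springRange:
--         if index == spring[0]-1:
--             join.append((0,spring))
--         elif index == spring[1]:
--             join.append((1,spring))
--     if len(join) == 0:
--         springRange.append((index,index+1))
--     elif len(join) == 1:
--         springRange.remove(join[0][1])
--         if join[0][0] == 0:
--             springRange.append((index,join[0][1][1]))
--         else:
--             springRange.append((join[0][1][0],index+1))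
--     else:
--         springRange.remove(join[0][1])
--         springRange.remove(join[1][1])
--         springRange.append((join[0][1][0],join[1][1][1]))
--     return sorted(springRange, key=lambda x: x[0])
--
-- def tryCombinations(indiciesList,springRange,count):
--     i = 0
--     for indicies in indiciesList:
--         newSpringRange = springRange.copy()
--         for index in indicies:
--             newSpringRange = addSpring(newSpringRange,index)
--         if valid(newSpringRange,count):
--             i+=1
--     return i
--
-- def valid(springRange,count):
--     if contiguous(springRange) == count:
--         return True
--     return False
-- ===== SOURCE B (Python) =====
-- def tryCombinations(indiciesList, springRange, count):
--     # Shared-prefix DFS: combinations with a common prefix of indices share one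
--     # spring-state computation; the state is sorted once and then maintained
--     # sorted by ordered insertion. Iterative (explicit stack), non-mutating.
--     def first_two(sr, index):
--         # first two springs (in list order) touching index on either side
--         m0 = m1 = None
--         for s in sr:
--             if index == s[0] - 1 or index == s[1]:
--                 if m0 is None:
--                     m0 = s
--                 else:
--                     m1 = s
--                     break
--         return m0, m1
--
--     def merged(m0, m1, index):
--         if m0 is None:
--             return (index, index + 1)
--         if m1 is None:
--             return (index, m0[1]) if index == m0[0] - 1 else (m0[0], index + 1)
--         return (m0[0], m1[1])
--
--     def remove2(sr, m0, m1):
--         out = list(sr)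
--         if m0 is not None:
--             out.remove(m0)
--         if m1 is not None:
--             out.remove(m1)
--         return out
--
--     def insort(sr, x):
--         # insert x after every element whose first component is <= x[0]
--         i = 0
--         while i < len(sr) and sr[i][0] <= x[0]:
--             i += 1
--         return sr[:i] + [x] + sr[i:]
--
--     total = 0
--     # task = (remaining index-suffixes, spring state, state already sorted?)
--     stack = [(list(indiciesList), springRange, False)]
--     while stack:
--         combs, sr, ready = stack.pop()
--         if not combs:
--             continue
--         c, rest = combs[0], combs[1:]
--         if not c:
--             if [b - a for (a, b) in sr] == count:
--                 total += 1
--             stack.append((rest, sr, ready))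
--             continue
--         idx = c[0]
--         same = [c[1:]] + [d[1:] for d in rest if d and d[0] == idx]
--         others = [d for d in rest if not d or d[0] != idx]
--         stack.append((others, sr, ready))
--         m0, m1 = first_two(sr, idx)
--         if ready:
--             new_sr = insort(remove2(sr, m0, m1), merged(m0, m1, idx))
--         else:
--             new_sr = sorted(remove2(sr, m0, m1) + [merged(m0, m1, idx)],
--                             key=lambda s: s[0])
--         stack.append((same, new_sr, True))
--     return total
-- ===== Notes on version B (the rewrite author's own statement) =====
-- stated objective: alternative
-- what changed: B replaces A's independent per-combination recomputation by a shared-prefix DFS over an explicit stack: combinations are grouped by equal leading index so a common prefix of merge steps is computed once, the state is sorted once per branch and then kept sorted by ordered insertion, and the valid combinations are counted as the DFS reaches exhausted suffixes.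
import Mathlib
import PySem

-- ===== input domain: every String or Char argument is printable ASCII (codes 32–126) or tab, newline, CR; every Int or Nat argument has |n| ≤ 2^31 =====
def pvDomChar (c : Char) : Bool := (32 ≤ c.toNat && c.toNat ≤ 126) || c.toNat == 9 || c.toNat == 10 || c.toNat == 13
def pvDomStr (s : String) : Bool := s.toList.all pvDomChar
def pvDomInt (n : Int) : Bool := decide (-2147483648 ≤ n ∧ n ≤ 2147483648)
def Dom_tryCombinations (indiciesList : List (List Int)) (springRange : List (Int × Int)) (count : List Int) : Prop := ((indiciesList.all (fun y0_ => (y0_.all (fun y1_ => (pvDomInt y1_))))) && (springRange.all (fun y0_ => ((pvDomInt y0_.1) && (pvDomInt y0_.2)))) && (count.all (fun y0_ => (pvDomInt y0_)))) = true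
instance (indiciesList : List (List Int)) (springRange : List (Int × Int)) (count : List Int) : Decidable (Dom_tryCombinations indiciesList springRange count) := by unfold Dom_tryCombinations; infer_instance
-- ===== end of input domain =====

-- B replaces A's independent per-combination recomputation by a shared-prefix DFS over an
-- explicit stack (common leading indices are merged once; the state is sorted once per
-- branch and then kept sorted by ordered insertion). Same count on every input.

-- ===== PORT A =====
-- contiguous(springRange)
def contiguousA (springRange : List (Int × Int)) : List Int :=
  springRange.map (fun spring => spring.2 - spring.1)

-- addSpring(springRange, index); list.remove ported via PySem.List.remove?;
-- the removed value always occurs in the list (it was collected from it), so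
-- Python's remove never raises and .getD only names the unreachable branch.
def addSpring (springRange : List (Int × Int)) (index : Int) : List (Int × Int) :=
  let join : List (Int × (Int × Int)) :=
    springRange.foldl (fun j spring =>
      if index == spring.1 - 1 then j ++ [((0 : Int), spring)]
      else if index == spring.2 then j ++ [((1 : Int), spring)]
      else j) []
  let sr' : List (Int × Int) :=
    match join with
    | [] => springRange ++ [(index, index + 1)]
    | [j0] =>
        let base := (PySem.List.remove? springRange j0.2).getD springRange
        if j0.1 == 0 then base ++ [(index, j0.2.2)]
        else base ++ [(j0.2.1, index + 1)]
    | j0 :: j1 :: _ =>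
        let b1 := (PySem.List.remove? springRange j0.2).getD springRange
        let b2 := (PySem.List.remove? b1 j1.2).getD b1
        b2 ++ [(j0.2.1, j1.2.2)]
  PySem.List.sorted sr' (fun x => x.1) false

-- valid(springRange, count)
def validA (springRange : List (Int × Int)) (count : List Int) : Bool :=
  contiguousA springRange == count

def tryCombinations (indiciesList : List (List Int)) (springRange : List (Int × Int)) (count : List Int) : Int :=
  indiciesList.foldl (fun i indicies =>
    let newSpringRange := indicies.foldl (fun l index => addSpring l index) springRange
    if validA newSpringRange count then i + 1 else i) 0

-- ===== PORT B =====
-- first_two's inner continuation after m0 is found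
def firstOneB (sr : List (Int × Int)) (index : Int) : Option (Int × Int) :=
  match sr with
  | [] => none
  | s :: t => if index == s.1 - 1 || index == s.2 then some s else firstOneB t index

-- first_two(sr, index)
def firstTwoB (sr : List (Int × Int)) (index : Int) : Option (Int × Int) × Option (Int × Int) :=
  match sr with
  | [] => (none, none)
  | s :: t =>
      if index == s.1 - 1 || index == s.2 then (some s, firstOneB t index)
      else firstTwoB t index

-- merged(m0, m1, index)
def mergedB (m0 m1 : Option (Int × Int)) (index : Int) : Int × Int :=
  match m0 with
  | none => (index, index + 1)
  | some a =>
      match m1 with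
      | none => if index == a.1 - 1 then (index, a.2) else (a.1, index + 1)
      | some b => (a.1, b.2)

-- one conditional list.remove (via PySem.List.remove?; the value stems from sr)
def remove1B (sr : List (Int × Int)) (m : Option (Int × Int)) : List (Int × Int) :=
  match m with
  | none => sr
  | some v => (PySem.List.remove? sr v).getD sr

-- remove2(sr, m0, m1): the two conditional removes of the Python step
def remove2B (sr : List (Int × Int)) (m0 m1 : Option (Int × Int)) : List (Int × Int) :=
  remove1B (remove1B sr m0) m1

-- insort(sr, x): x goes after every element whose first component is ≤ x's
-- (recursive transcription of the scan-then-splice loop)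
def insortB (sr : List (Int × Int)) (x : Int × Int) : List (Int × Int) :=
  match sr with
  | [] => [x]
  | s :: t => if s.1 ≤ x.1 then s :: insortB t x else x :: s :: t

-- the ready=True branch of the stack loop's step
def stepB (sr : List (Int × Int)) (index : Int) : List (Int × Int) :=
  let m := firstTwoB sr index
  insortB (remove2B sr m.1 m.2) (mergedB m.1 m.2 index)

-- the ready=False branch (first step of a branch: full sort)
def firstStepB (sr : List (Int × Int)) (index : Int) : List (Int × Int) :=
  let m := firstTwoB sr index
  PySem.List.sorted (remove2B sr m.1 m.2 ++ [mergedB m.1 m.2 index]) (fun s => s.1) false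

-- the validity test [b - a for (a,b) in sr] == count
def hitB (count : List Int) (sr : List (Int × Int)) : Bool :=
  sr.map (fun p => p.2 - p.1) == count

-- the suffixes sharing the popped head (their tails), and the rest
def sameOf (idx : Int) (t : List Int) (rest : List (List Int)) : List (List Int) :=
  t :: (rest.filter (fun d => d.head? == some idx)).map List.tail

def othersOf (idx : Int) (rest : List (List Int)) : List (List Int) :=
  rest.filter (fun d => !(d.head? == some idx))

-- termination measure of the stack loop (cited by loopB's decreasing_by)
def muL (combs : List (List Int)) : Nat := (combs.map (fun c => c.length + 1)).sum

def muS (stack : List (List (List Int) × List (Int × Int) × Bool)) : Nat :=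
  (stack.map (fun task => muL task.1)).sum

theorem muL_split (rest : List (List Int)) (idx : Int) :
    muL ((rest.filter (fun d => d.head? == some idx)).map List.tail)
      + muL (rest.filter (fun d => !(d.head? == some idx))) ≤ muL rest := by
  induction rest with
  | nil => simp [muL]
  | cons d t ih =>
      have hd : d.tail.length ≤ d.length := by cases d <;> simp
      simp only [muL] at ih ⊢
      cases h : (d.head? == some idx)
      · rw [List.filter_cons_of_neg (by simp [h]), List.filter_cons_of_pos (by simp [h])]
        simp only [List.map_cons, List.sum_cons]
        omega
      · rw [List.filter_cons_of_pos (by simp [h]), List.filter_cons_of_neg (by simp [h])]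
        simp only [List.map_cons, List.map_map, List.sum_cons]
        simp only [List.map_map] at ih
        omega

-- the DFS stack loop; each task is (remaining suffixes, state, state sorted?);
-- Python pushes others then same, so same is consed on top here
def loopB (count : List Int) (stack : List (List (List Int) × List (Int × Int) × Bool))
    (total : Int) : Int :=
  match stack with
  | [] => total
  | (combs, sr, ready) :: stack' =>
      match combs with
      | [] => loopB count stack' total
      | [] :: rest =>
          loopB count ((rest, sr, ready) :: stack')
            (if hitB count sr then total + 1 else total)
      | (idx :: t) :: rest =>
          loopB count
            ((sameOf idx t rest, (if ready then stepB sr idx else firstStepB sr idx), true)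
             :: (othersOf idx rest, sr, ready) :: stack')
            total
termination_by 2 * muS stack + stack.length
decreasing_by
  · simp only [muS, muL, List.map_cons, List.sum_cons, List.map_nil, List.sum_nil,
      List.length_cons]
    omega
  · simp only [muS, muL, List.map_cons, List.sum_cons, List.length_cons]
    omega
  · have h := muL_split rest idx
    simp only [muS, List.map_cons, List.sum_cons, List.length_cons, sameOf, othersOf]
    simp only [muL, List.map_cons, List.sum_cons, List.length_cons] at h ⊢
    omega

def tryCombinations_alt (indiciesList : List (List Int)) (springRange : List (Int × Int)) (count : List Int) : Int :=
  loopB count [(indiciesList, springRange, false)] 0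

-- ===== PRECONDITION & SPEC =====
def Spec_tryCombinations (indiciesList : List (List Int)) (springRange : List (Int × Int)) (count : List Int) (out : Int) : Prop := out = tryCombinations_alt indiciesList springRange count
instance (indiciesList : List (List Int)) (springRange : List (Int × Int)) (count : List Int) (out : Int) : Decidable (Spec_tryCombinations indiciesList springRange count out) := by unfold Spec_tryCombinations; infer_instance

-- ===== CLAIM (what is proved, stated in full; the proofs are below) =====
def Claim_equal_tryCombinations : Prop := ∀ (indiciesList : List (List Int)) (springRange : List (Int × Int)) (count : List Int), Dom_tryCombinations indiciesList springRange count → Spec_tryCombinations indiciesList springRange count (tryCombinations indiciesList springRange count)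

-- ===== LEMMAS AND PROOFS =====

-- the state a suffix c reaches from sr under the readiness flag
def runB (sr : List (Int × Int)) (ready : Bool) (c : List Int) : List (Int × Int) :=
  if ready then c.foldl stepB sr
  else match c with
    | [] => sr
    | i :: rest => rest.foldl stepB (firstStepB sr i)

def combSum (count : List Int) (sr : List (Int × Int)) (ready : Bool)
    (combs : List (List Int)) : Int :=
  (combs.map (fun c => if hitB count (runB sr ready c) then (1 : Int) else 0)).sum

def taskSum (count : List Int)
    (stack : List (List (List Int) × List (Int × Int) × Bool)) : Int :=
  (stack.map (fun task => combSum count task.2.1 task.2.2 task.1)).sum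

-- A's join, written as direct recursion
def joinRec (sr : List (Int × Int)) (index : Int) : List (Int × (Int × Int)) :=
  match sr with
  | [] => []
  | s :: t =>
      if index == s.1 - 1 then ((0 : Int), s) :: joinRec t index
      else if index == s.2 then ((1 : Int), s) :: joinRec t index
      else joinRec t index

theorem join_foldl_eq (sr : List (Int × Int)) (index : Int) (acc : List (Int × (Int × Int))) :
    sr.foldl (fun j spring =>
      if index == spring.1 - 1 then j ++ [((0 : Int), spring)]
      else if index == spring.2 then j ++ [((1 : Int), spring)]
      else j) acc = acc ++ joinRec sr index := by
  induction sr generalizing acc with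
  | nil => simp [joinRec]
  | cons s t ih =>
      rw [List.foldl_cons, ih]
      by_cases h1 : index = s.1 - 1
      · simp [joinRec, h1]
      · by_cases h2 : index = s.2
        · subst h2; simp [joinRec, h1]
        · simp [joinRec, h1, h2]

theorem firstOneB_eq (sr : List (Int × Int)) (index : Int) :
    firstOneB sr index = (joinRec sr index).head?.map (·.2) := by
  induction sr with
  | nil => simp [firstOneB, joinRec]
  | cons s t ih =>
      simp only [firstOneB, joinRec]
      by_cases h1 : index = s.1 - 1
      · rw [if_pos (by simp [h1]), if_pos (by simpa using h1)]; simp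
      · by_cases h2 : index = s.2
        · rw [if_pos (by simp [h2]), if_neg (by simpa using h1), if_pos (by simpa using h2)]
          simp
        · rw [if_neg (by simp [h1, h2]), if_neg (by simpa using h1), if_neg (by simpa using h2)]
          exact ih

theorem firstTwoB_eq (sr : List (Int × Int)) (index : Int) :
    firstTwoB sr index =
      (match joinRec sr index with
       | [] => (none, none)
       | [j0] => (some j0.2, none)
       | j0 :: j1 :: _ => (some j0.2, some j1.2)) := by
  induction sr with
  | nil => simp [firstTwoB, joinRec]
  | cons s t ih =>
      simp only [firstTwoB, joinRec]
      by_cases h1 : index = s.1 - 1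
      · rw [if_pos (by simp [h1]), if_pos (by simpa using h1), firstOneB_eq]
        cases joinRec t index with
        | nil => simp
        | cons a u => simp
      · by_cases h2 : index = s.2
        · rw [if_pos (by simp [h2]), if_neg (by simpa using h1), if_pos (by simpa using h2),
            firstOneB_eq]
          cases joinRec t index with
          | nil => simp
          | cons a u => simp
        · rw [if_neg (by simp [h1, h2]), if_neg (by simpa using h1), if_neg (by simpa using h2)]
          exact ih

-- every join entry's tag records which side it matched on
theorem joinRec_tags (sr : List (Int × Int)) (index : Int) :
    ∀ j ∈ joinRec sr index,
      (j.1 = 0 ∧ index = j.2.1 - 1) ∨ (j.1 = 1 ∧ index = j.2.2 ∧ index ≠ j.2.1 - 1) := by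
  induction sr with
  | nil => simp [joinRec]
  | cons s t ih =>
      intro j hj
      simp only [joinRec] at hj
      split_ifs at hj with h1 h2
      · rcases List.mem_cons.mp hj with h | h
        · subst h; left; exact ⟨rfl, by simpa using h1⟩
        · exact ih j h
      · rcases List.mem_cons.mp hj with h | h
        · subst h; right; exact ⟨rfl, by simpa using h2, by simpa using h1⟩
        · exact ih j h
      · exact ih j hj

-- A's step is B's first step (full sort of the updated list), on every list
theorem addSpring_eq_firstStepB (sr : List (Int × Int)) (index : Int) :
    addSpring sr index = firstStepB sr index := by
  unfold addSpring firstStepB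
  rw [join_foldl_eq, firstTwoB_eq]
  cases hj : joinRec sr index with
  | nil => simp [remove2B, remove1B, mergedB]
  | cons j0 u =>
      cases u with
      | nil =>
          have ht := joinRec_tags sr index j0 (by simp [hj])
          rcases ht with ⟨h0, he⟩ | ⟨h1, he, hne⟩
          · simp [remove2B, remove1B, mergedB, h0, ← he]
          · simp [remove2B, remove1B, mergedB, h1, hne]
      | cons j1 v => simp [remove2B, remove1B, mergedB]

-- sorted-insert characterisation: appending then stably sorting an already
-- sorted list is ordered insertion
theorem sorted_append_singleton (base : List (Int × Int)) (x : Int × Int)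
    (h : base.Pairwise (fun a b => a.1 ≤ b.1)) :
    PySem.List.sorted (base ++ [x]) (fun s => s.1) false = insortB base x := by
  rw [PySem.List.sorted_eq_foldl_insertBy, List.foldl_append]
  rw [← PySem.List.sorted_eq_foldl_insertBy, PySem.List.sorted_eq_self_of_pairwise _ _ h]
  simp only [List.foldl_cons, List.foldl_nil]
  induction base with
  | nil => simp [PySem.List.insertBy, insortB]
  | cons s t ih =>
      rw [List.pairwise_cons] at h
      simp only [PySem.List.insertBy, insortB]
      by_cases hle : s.1 ≤ x.1
      · simp [show ¬ x.1 < s.1 by omega, hle, ih h.2]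
      · simp [show x.1 < s.1 by omega, hle]

theorem erase_pairwise (l : List (Int × Int)) (v : Int × Int)
    (h : l.Pairwise (fun a b => a.1 ≤ b.1)) :
    (l.erase v).Pairwise (fun a b => a.1 ≤ b.1) :=
  h.sublist List.erase_sublist

theorem removeGetD_eq_erase (l : List (Int × Int)) (v : Int × Int) :
    (PySem.List.remove? l v).getD l = l.erase v := by
  by_cases hm : v ∈ l
  · rw [PySem.List.remove?_eq_some_erase _ _ hm]; rfl
  · rw [(PySem.List.remove?_eq_none_iff l v).mpr hm, List.erase_of_not_mem hm]; rfl

theorem remove1B_pairwise (sr : List (Int × Int)) (m : Option (Int × Int))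
    (h : sr.Pairwise (fun a b => a.1 ≤ b.1)) :
    (remove1B sr m).Pairwise (fun a b => a.1 ≤ b.1) := by
  cases m with
  | none => exact h
  | some v => simpa [remove1B, removeGetD_eq_erase] using erase_pairwise sr v h

theorem remove2B_pairwise (sr : List (Int × Int)) (m0 m1 : Option (Int × Int))
    (h : sr.Pairwise (fun a b => a.1 ≤ b.1)) :
    (remove2B sr m0 m1).Pairwise (fun a b => a.1 ≤ b.1) :=
  remove1B_pairwise _ _ (remove1B_pairwise _ _ h)

-- on a sorted list, B's maintained step equals B's full-sort step (= A's step)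
theorem stepB_eq_firstStepB (sr : List (Int × Int)) (index : Int)
    (h : sr.Pairwise (fun a b => a.1 ≤ b.1)) :
    stepB sr index = firstStepB sr index := by
  unfold stepB firstStepB
  rw [sorted_append_singleton _ _ (remove2B_pairwise sr _ _ h)]

theorem addSpring_pairwise (sr : List (Int × Int)) (index : Int) :
    (addSpring sr index).Pairwise (fun a b => a.1 ≤ b.1) := by
  unfold addSpring
  exact PySem.List.sorted_pairwise _ _

theorem foldl_stepB_eq (rest : List Int) (l : List (Int × Int))
    (h : l.Pairwise (fun a b => a.1 ≤ b.1)) :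
    rest.foldl stepB l = rest.foldl (fun l index => addSpring l index) l := by
  induction rest generalizing l with
  | nil => rfl
  | cons i t ih =>
      simp only [List.foldl_cons]
      rw [stepB_eq_firstStepB l i h, ← addSpring_eq_firstStepB]
      exact ih _ (addSpring_pairwise l i)

-- B's branch state equals A's fold of addSpring
theorem runB_false_eq (springRange : List (Int × Int)) (c : List Int) :
    runB springRange false c =
      c.foldl (fun l index => addSpring l index) springRange := by
  cases c with
  | nil => rfl
  | cons i rest =>
      simp only [runB, List.foldl_cons, Bool.false_eq_true, if_false]
      rw [← addSpring_eq_firstStepB,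
        foldl_stepB_eq rest _ (addSpring_pairwise springRange i), addSpring_eq_firstStepB]

-- splitting an Int sum along a Boolean filter
theorem sum_map_filter_split {α : Type} (l : List α) (p : α → Bool) (f : α → Int) :
    ((l.filter p).map f).sum + ((l.filter (fun x => !(p x))).map f).sum
      = (l.map f).sum := by
  induction l with
  | nil => simp
  | cons a t ih =>
      cases h : p a
      · rw [List.filter_cons_of_neg (by simp [h]), List.filter_cons_of_pos (by simp [h])]
        simp only [List.map_cons, List.sum_cons]
        omega
      · rw [List.filter_cons_of_pos (by simp [h]), List.filter_cons_of_neg (by simp [h])]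
        simp only [List.map_cons, List.sum_cons]
        omega

-- suffixes matching the popped head reach their state through the new branch state
theorem runB_cons (sr : List (Int × Int)) (ready : Bool) (idx : Int) (tl : List Int) :
    runB sr ready (idx :: tl)
      = runB (if ready then stepB sr idx else firstStepB sr idx) true tl := by
  cases ready <;> simp [runB]

theorem combSum_step (count : List Int) (sr : List (Int × Int)) (ready : Bool)
    (idx : Int) (t : List Int) (rest : List (List Int)) :
    combSum count sr ready ((idx :: t) :: rest)
      = combSum count (if ready then stepB sr idx else firstStepB sr idx) true
          (sameOf idx t rest)
        + combSum count sr ready (othersOf idx rest) := by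
  unfold combSum sameOf othersOf
  simp only [List.map_cons, List.sum_cons]
  rw [← sum_map_filter_split rest (fun d => d.head? == some idx)]
  rw [runB_cons]
  have hmap :
      ((rest.filter (fun d => d.head? == some idx)).map
        (fun c => if hitB count (runB sr ready c) then (1 : Int) else 0))
      = (((rest.filter (fun d => d.head? == some idx)).map List.tail).map
        (fun c => if hitB count (runB (if ready then stepB sr idx else firstStepB sr idx) true c)
          then (1 : Int) else 0)) := by
    rw [List.map_map]
    apply List.map_congr_left
    intro d hd
    have hh : d.head? = some idx := by
      have := List.mem_filter.mp hd
      simpa using this.2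
    cases d with
    | nil => simp at hh
    | cons a tl =>
        have ha : a = idx := by simpa using hh
        subst ha
        simp only [Function.comp, List.tail_cons]
        rw [runB_cons]
        rfl
  rw [hmap]
  omega

-- the loop computes the accumulated total plus the per-suffix indicator sum
theorem loopB_eq_taskSum (count : List Int)
    (stack : List (List (List Int) × List (Int × Int) × Bool)) (total : Int) :
    loopB count stack total = total + taskSum count stack := by
  fun_induction loopB count stack total with
  | case1 total => simp [taskSum]
  | case2 total sr ready stack' ih =>
      rw [ih]; simp [taskSum, combSum]
  | case3 total sr ready stack' rest ih =>
      simp only [dite_eq_ite] at ih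
      rw [ih]
      have hrun : runB sr ready ([] : List Int) = sr := by cases ready <;> simp [runB]
      simp only [taskSum, List.map_cons, List.sum_cons, combSum, hrun]
      split_ifs <;> omega
  | case4 total sr ready stack' idx t rest ih =>
      simp only [dite_eq_ite] at ih
      rw [ih]
      simp only [taskSum, List.map_cons, List.sum_cons]
      rw [combSum_step]
      omega

-- A's counting fold is the indicator sum
theorem foldA_eq_sum (count : List Int) (springRange : List (Int × Int))
    (iL : List (List Int)) (acc : Int) :
    iL.foldl (fun i indicies =>
        let newSpringRange := indicies.foldl (fun l index => addSpring l index) springRange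
        if validA newSpringRange count then i + 1 else i) acc
      = acc + (iL.map (fun c =>
          if validA (c.foldl (fun l index => addSpring l index) springRange) count
          then (1 : Int) else 0)).sum := by
  induction iL generalizing acc with
  | nil => simp
  | cons c rest ih =>
      simp only [List.foldl_cons, List.map_cons, List.sum_cons]
      rw [ih]
      split_ifs <;> omega

-- ===== VERDICT (by name: the statement is the Claim_ definition above) =====
theorem tryCombinations_spec : Claim_equal_tryCombinations := by
  intro indiciesList springRange count _
  unfold Spec_tryCombinations tryCombinations tryCombinations_alt
  rw [loopB_eq_taskSum, foldA_eq_sum]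
  simp only [taskSum, List.map_cons, List.map_nil, List.sum_cons, List.sum_nil, add_zero,
    zero_add, combSum]
  congr 1
  apply List.map_congr_left
  intro c _
  rw [runB_false_eq]
  rfl
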